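-- pv_equiv track=rewrite | github.com/daniel0tgc/Media_Hackathon | physiological-insights-algorithms/physiological_insights/agent_payload.py | _count_overreach
-- ===== SOURCE A (Python) =====
-- def _count_overreach(daily_strain: list) -> int:
--     count = 0
--     for d in reversed(daily_strain):
--         if d.get("strain_score", 0) >= 18:
--             count += 1
--         else:
--             break
--     return count
-- ===== SOURCE B (Python) =====
-- def _count_overreach(daily_strain: list) -> int:
--     run = 0
--     for d in daily_strain:
--         if d.get("strain_score", 0) >= 18:
--             run += 1
--         else:
--             run = 0
--     return run
-- ===== Notes on version B (the rewrite author's own statement) =====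
-- stated objective: alternative
-- what changed: Replaces the reversed-iteration-with-break of A by a single forward pass maintaining a reset-on-failure run counter whose final value is the trailing run length.
import Mathlib
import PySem

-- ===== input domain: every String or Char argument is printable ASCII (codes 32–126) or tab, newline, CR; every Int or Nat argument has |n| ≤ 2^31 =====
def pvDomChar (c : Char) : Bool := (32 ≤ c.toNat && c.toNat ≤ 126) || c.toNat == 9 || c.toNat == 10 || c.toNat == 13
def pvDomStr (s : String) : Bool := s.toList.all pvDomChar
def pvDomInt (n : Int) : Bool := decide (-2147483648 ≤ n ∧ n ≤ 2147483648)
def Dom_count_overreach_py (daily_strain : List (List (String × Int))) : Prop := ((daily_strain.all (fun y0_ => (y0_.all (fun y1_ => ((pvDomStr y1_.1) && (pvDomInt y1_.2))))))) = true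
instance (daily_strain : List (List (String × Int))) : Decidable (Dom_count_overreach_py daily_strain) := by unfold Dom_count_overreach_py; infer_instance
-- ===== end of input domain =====

-- B changes the decomposition: a forward pass with a reset-on-failure run counter instead of A's reversed scan with break. Return-value equivalence only.
-- ===== PORT A =====
-- dict.get("strain_score", 0) on an association list (first match, per the type convention)
def pvStrain (d : List (String × Int)) : Int :=
  ((d.find? (fun p => p.1 == "strain_score")).map Prod.snd).getD 0

-- 'count = 0; for d in reversed(daily_strain): if …: count += 1 else: break'
def pvLoopA (count : Int) : List (List (String × Int)) → Int
  | [] => count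
  | d :: rest => if pvStrain d ≥ 18 then pvLoopA (count + 1) rest else count

def count_overreach_py (daily_strain : List (List (String × Int))) : Int :=
  pvLoopA 0 daily_strain.reverse

-- ===== PORT B =====
-- 'run = 0; for d in daily_strain: run = run + 1 if …, else 0'
def count_overreach_py_alt (daily_strain : List (List (String × Int))) : Int :=
  daily_strain.foldl (fun run d => if pvStrain d ≥ 18 then run + 1 else 0) 0

-- ===== PRECONDITION & SPEC =====
def Spec_count_overreach_py (daily_strain : List (List (String × Int))) (out : Int) : Prop := out = count_overreach_py_alt daily_strain
instance (daily_strain : List (List (String × Int))) (out : Int) : Decidable (Spec_count_overreach_py daily_strain out) := by unfold Spec_count_overreach_py; infer_instance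

-- ===== CLAIM (what is proved, stated in full; the proofs are below) =====
def Claim_equal_count_overreach_py : Prop := ∀ (daily_strain : List (List (String × Int))), Dom_count_overreach_py daily_strain → Spec_count_overreach_py daily_strain (count_overreach_py daily_strain)

-- ===== LEMMAS AND PROOFS =====
theorem pvLoopA_shift (l : List (List (String × Int))) (c : Int) :
    pvLoopA c l = c + pvLoopA 0 l := by
  induction l generalizing c with
  | nil => simp [pvLoopA]
  | cons d t ih =>
    simp only [pvLoopA]
    split_ifs
    · rw [ih (c + 1), ih (0 + 1)]; ring
    · simp

theorem main_eq (l : List (List (String × Int))) :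
    count_overreach_py l = count_overreach_py_alt l := by
  induction l using List.reverseRecOn with
  | nil => rfl
  | append_singleton t d ih =>
    unfold count_overreach_py count_overreach_py_alt at *
    rw [List.reverse_append, List.foldl_append]
    simp only [List.reverse_singleton, List.singleton_append, List.foldl_cons, List.foldl_nil, pvLoopA]
    split_ifs
    · rw [pvLoopA_shift, ih]; ring
    · rfl

-- ===== VERDICT (by name: the statement is the Claim_ definition above) =====
theorem count_overreach_py_spec : Claim_equal_count_overreach_py :=
  fun l _ => main_eq l
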